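-- pv_equiv track=rewrite | github.com/981377660LMT/algorithm-study | 22_专题/前缀与差分/Outstanding Move.py | solve
-- ===== SOURCE A (Python) =====
-- from itertools import accumulate
--
-- def solve(nums):
--     n = len(nums)
--     preSum = [0] + list(accumulate(nums))
--     base = sum((i + 1) * nums[i] for i in range(n))
--
--     res = base
--
--     # 将位置i的元素换到j的增量
--     for i in range(n):
--         for j in range(n + 1):
--             if i == j:
--                 continue
--
--             res = max(res, base + preSum[i] - preSum[j] - (i - j) * nums[i])
--
--     return res
-- ===== SOURCE B (Python) =====
-- from itertools import accumulate
--
-- def solve(nums):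
--     # Upper convex hull of the points (j, -preSum[j]); the best destination for each
--     # element is a max of linear functions, queried on the hull instead of all n+1 slots.
--     n = len(nums)
--     if n == 0:
--         return 0
--     preSum = [0] + list(accumulate(nums))
--     base = sum((i + 1) * v for i, v in enumerate(nums))
--     hull = []
--     for j in range(n + 1):
--         pt = (j, -preSum[j])
--         while len(hull) >= 2:
--             qx, qy = hull[-2]
--             px, py = hull[-1]
--             if (px - qx) * (pt[1] - qy) - (py - qy) * (pt[0] - qx) >= 0:
--                 hull.pop()
--             else:
--                 break
--         hull.append(pt)
--     best = max(max(x * hx + hy for hx, hy in hull) + preSum[i] - i * x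
--                for i, x in enumerate(nums))
--     return base + best
-- ===== Notes on version B (the rewrite author's own statement) =====
-- stated objective: faster
-- what changed: Replaces A's O(n^2) scan of every destination j for every element i by one upper convex hull of the points (j, -preSum[j]) built with a monotone stack, querying only the hull (typically far smaller than n+1 positions) for each element's slope nums[i].
import Mathlib
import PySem

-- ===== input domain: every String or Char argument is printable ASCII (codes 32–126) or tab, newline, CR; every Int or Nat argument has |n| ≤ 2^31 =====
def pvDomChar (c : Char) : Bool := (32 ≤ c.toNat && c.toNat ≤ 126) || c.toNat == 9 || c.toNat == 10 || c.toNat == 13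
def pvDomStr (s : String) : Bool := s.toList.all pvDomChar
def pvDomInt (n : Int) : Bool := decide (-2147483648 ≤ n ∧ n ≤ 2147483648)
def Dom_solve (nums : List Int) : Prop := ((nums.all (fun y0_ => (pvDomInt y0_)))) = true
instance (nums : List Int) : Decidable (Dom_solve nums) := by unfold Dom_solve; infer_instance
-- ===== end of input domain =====

-- B replaces A's scan of all n+1 destinations per element by one upper convex hull of the
-- points (j, -preSum[j]) queried per element (usually far smaller than n); exact same result.

-- ===== PORT A =====
-- [0] + list(accumulate(nums)) is exactly List.scanl (·+·) 0 nums
def solve (nums : List Int) : Int :=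
  let n : Int := nums.length
  let preSum : List Int := List.scanl (· + ·) 0 nums
  let base : Int :=
    (PySem.List.pyRange 0 n 1).foldl (fun s i => s + (i + 1) * PySem.List.pyGetD nums i 0) 0
  (PySem.List.pyRange 0 n 1).foldl (fun res i =>
    (PySem.List.pyRange 0 (n + 1) 1).foldl (fun res j =>
      if i = j then res
      else max res (base + PySem.List.pyGetD preSum i 0 - PySem.List.pyGetD preSum j 0
                      - (i - j) * PySem.List.pyGetD nums i 0)) res) base

-- ===== PORT B =====
-- the inner 'while … hull.pop()' loop; the Lean hull list is Python's hull reversed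
-- (head = most recently appended point), the natural encoding of append/pop-at-end
def popHull (r : Int × Int) : List (Int × Int) → List (Int × Int)
  | p :: q :: t =>
    if (p.1 - q.1) * (r.2 - q.2) - (p.2 - q.2) * (r.1 - q.1) ≥ 0 then popHull r (q :: t)
    else p :: q :: t
  | h => h

-- max(x * hx + hy for hx, hy in hull)
def hullQuery (x : Int) : List (Int × Int) → Int
  | [] => 0
  | p :: t => t.foldl (fun m q => max m (x * q.1 + q.2)) (x * p.1 + p.2)

def solve_alt (nums : List Int) : Int :=
  if nums = [] then 0
  else
    let n : Int := nums.length
    let preSum : List Int := List.scanl (· + ·) 0 nums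
    let base : Int := ((PySem.List.enumerate nums 0).map (fun iv => (iv.1 + 1) * iv.2)).sum
    let hull : List (Int × Int) :=
      (PySem.List.pyRange 0 (n + 1) 1).foldl
        (fun h j => (j, -(PySem.List.pyGetD preSum j 0)) ::
                    popHull (j, -(PySem.List.pyGetD preSum j 0)) h) []
    match (PySem.List.enumerate nums 0).map (fun iv =>
        hullQuery iv.2 hull + PySem.List.pyGetD preSum iv.1 0 - iv.1 * iv.2) with
    | [] => base
    | v :: t => base + t.foldl max v

-- ===== PRECONDITION & SPEC =====
def Spec_solve (nums : List Int) (out : Int) : Prop := out = solve_alt nums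
instance (nums : List Int) (out : Int) : Decidable (Spec_solve nums out) := by
  unfold Spec_solve; infer_instance

-- ===== CLAIM (what is proved, stated in full; the proofs are below) =====
def Claim_equal_solve : Prop := ∀ (nums : List Int), Dom_solve nums → Spec_solve nums (solve nums)

-- ===== LEMMAS AND PROOFS =====

-- value of the linear function with slope x at point p
def fval (x : Int) (p : Int × Int) : Int := x * p.1 + p.2

def hstep (h : List (Int × Int)) (r : Int × Int) : List (Int × Int) := r :: popHull r h

-- ---- generic foldl-max lemmas ----
lemma foldl_max_swap (l : List Int) : ∀ (a b : Int), l.foldl max (max a b) = max a (l.foldl max b) := by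
  induction l with
  | nil => intro a b; rfl
  | cons c t ih => intro a b; simpa [List.foldl, max_assoc] using ih a (max b c)

lemma le_foldl_max_init (l : List Int) : ∀ (a : Int), a ≤ l.foldl max a := by
  induction l with
  | nil => intro a; exact le_refl a
  | cons c t ih => intro a; exact le_trans (le_max_left a c) (ih (max a c))

lemma foldl_max_cons_split (c d : Int) (ds : List Int) :
    (d :: ds).foldl max c = max c (ds.foldl max d) := by
  simpa [List.foldl] using foldl_max_swap ds c d

lemma foldl_max_map_add (g : Int → Int) (a : Int) (l : List Int) :
    ∀ (c : Int), (l.map (fun t => a + g t)).foldl max (a + c) = a + (l.map g).foldl max c := by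
  induction l with
  | nil => intro c; rfl
  | cons h t ih =>
      intro c
      simp only [List.map_cons, List.foldl_cons]
      rw [show max (a + c) (a + g h) = a + max c (g h) from max_add_add_left a c (g h)]
      exact ih (max c (g h))

lemma maximum_cons_foldl (l : List Int) : ∀ (a : Int), (a :: l).maximum = ((l.foldl max a : Int) : WithBot Int) := by
  induction l with
  | nil => intro a; simp
  | cons b t ih =>
      intro a
      rw [List.maximum_cons, ih b, List.foldl_cons]
      rw [show (List.foldl max (max a b) t) = max a (t.foldl max b) from foldl_max_swap t a b]
      exact (WithBot.coe_max _ _).symm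

-- ---- hull lemmas ----
lemma popHull_sublist (r : Int × Int) : ∀ (h : List (Int × Int)), (popHull r h).Sublist h
  | [] => by simp [popHull]
  | [p] => by simp [popHull]
  | p :: q :: t => by
      rw [popHull]
      split
      · exact (popHull_sublist r (q :: t)).trans (List.sublist_cons_self _ _)
      · exact List.Sublist.refl _

-- a point on/below the chord is dominated by the chord's endpoints for every slope
lemma chord_drop (x qx qy px py rx ry : Int) (h1 : qx < px) (h2 : px < rx)
    (hc : (px - qx) * (ry - qy) - (py - qy) * (rx - qx) ≥ 0) :
    x * px + py ≤ max (x * qx + qy) (x * rx + ry) := by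
  rcases le_total (x * qx + qy) (x * rx + ry) with h | h
  · rw [max_eq_right h]; nlinarith [mul_le_mul_of_nonneg_left h (by omega : (0:Int) ≤ px - qx)]
  · rw [max_eq_left h]; nlinarith [mul_le_mul_of_nonneg_left h (by omega : (0:Int) ≤ rx - px)]

lemma popHull_max (x : Int) (r : Int × Int) :
    ∀ (h : List (Int × Int)), h.Pairwise (fun a b => b.1 < a.1) → (∀ p ∈ h, p.1 < r.1) →
      ((r :: popHull r h).map (fval x)).maximum = ((r :: h).map (fval x)).maximum
  | [] => by intro _ _; rfl
  | [p] => by intro _ _; rfl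
  | p :: q :: t => by
      intro hpw hb
      rw [popHull]
      split
      · next hcond =>
        have hq : q.1 < p.1 := (List.pairwise_cons.1 hpw).1 q (by simp)
        have hp : p.1 < r.1 := hb p (by simp)
        have hr : q.1 < r.1 := lt_trans hq hp
        have ih := popHull_max x r (q :: t) (List.Pairwise.of_cons hpw)
          (fun s hs => hb s (List.mem_cons_of_mem _ hs))
        rw [ih]
        -- drop p from the maximum: fval x p ≤ max (fval x q) (fval x r)
        have hdrop : fval x p ≤ max (fval x q) (fval x r) := by
          have := chord_drop x q.1 q.2 p.1 p.2 r.1 r.2 hq hp hcond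
          simpa [fval] using this
        have hqM : ((fval x q : Int) : WithBot Int) ≤ ((q :: t).map (fval x)).maximum :=
          List.le_maximum_of_mem' (by simp)
        have hpM : ((fval x p : Int) : WithBot Int) ≤
            max ((fval x r : Int) : WithBot Int) (((q :: t).map (fval x)).maximum) := by
          calc ((fval x p : Int) : WithBot Int) ≤ ((max (fval x q) (fval x r) : Int) : WithBot Int) :=
                WithBot.coe_le_coe.2 hdrop
            _ = max ((fval x q : Int) : WithBot Int) ((fval x r : Int) : WithBot Int) :=
                WithBot.coe_max _ _
            _ ≤ _ := by
                rw [max_comm ((fval x r : Int) : WithBot Int) _]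
                exact max_le_max hqM (le_refl _)
        show ((r :: q :: t).map (fval x)).maximum = ((r :: p :: q :: t).map (fval x)).maximum
        have e1 : ((r :: q :: t).map (fval x)).maximum
            = max ((fval x r : Int) : WithBot Int) (((q :: t).map (fval x)).maximum) := by
          rw [List.map_cons, List.maximum_cons]
        have e2 : ((r :: p :: q :: t).map (fval x)).maximum
            = max ((fval x r : Int) : WithBot Int)
                (max ((fval x p : Int) : WithBot Int) (((q :: t).map (fval x)).maximum)) := by
          rw [List.map_cons, List.maximum_cons, List.map_cons, List.maximum_cons]
        rw [e1, e2, max_left_comm]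
        exact (max_eq_right hpM).symm
      · rfl

lemma hull_fold_max (x : Int) :
    ∀ (l h : List (Int × Int)), h.Pairwise (fun a b => b.1 < a.1) →
      l.Pairwise (fun a b => a.1 < b.1) → (∀ p ∈ h, ∀ s ∈ l, p.1 < s.1) →
      ((l.foldl hstep h).map (fval x)).maximum
        = max ((h.map (fval x)).maximum) ((l.map (fval x)).maximum) := by
  intro l
  induction l with
  | nil =>
      intro h _ _ _
      simp
  | cons r t ih =>
      intro h hh hl hbd
      have hbr : ∀ p ∈ h, p.1 < r.1 := fun p hp => hbd p hp r (by simp)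
      have hh' : (hstep h r).Pairwise (fun a b => b.1 < a.1) := by
        refine List.pairwise_cons.2 ⟨fun s hs => hbr s ((popHull_sublist r h).subset hs), ?_⟩
        exact hh.sublist (popHull_sublist r h)
      have hl' : t.Pairwise (fun a b => a.1 < b.1) := List.Pairwise.of_cons hl
      have hbd' : ∀ p ∈ hstep h r, ∀ s ∈ t, p.1 < s.1 := by
        intro p hp s hs
        rcases List.mem_cons.1 hp with hpr | hp'
        · subst hpr; exact (List.pairwise_cons.1 hl).1 s hs
        · exact hbd p ((popHull_sublist r h).subset hp') s (List.mem_cons_of_mem _ hs)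
      have := ih (hstep h r) hh' hl' hbd'
      rw [List.foldl_cons]
      show ((t.foldl hstep (hstep h r)).map (fval x)).maximum = _
      rw [this]
      have hph : ((hstep h r).map (fval x)).maximum = ((r :: h).map (fval x)).maximum :=
        popHull_max x r h hh hbr
      rw [hph, List.map_cons, List.maximum_cons, List.map_cons, List.maximum_cons]
      rw [max_assoc, max_left_comm]

lemma foldl_hstep_ne_nil : ∀ (l h : List (Int × Int)), h ≠ [] → l.foldl hstep h ≠ [] := by
  intro l
  induction l with
  | nil => intro h hh; simpa using hh
  | cons r t ih => intro h _; exact ih (hstep h r) (by simp [hstep])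

lemma hullQuery_eq (x : Int) (h : List (Int × Int)) (hne : h ≠ []) :
    ((hullQuery x h : Int) : WithBot Int) = (h.map (fval x)).maximum := by
  cases h with
  | nil => exact absurd rfl hne
  | cons p t =>
      rw [hullQuery]
      have : t.foldl (fun m q => max m (x * q.1 + q.2)) (x * p.1 + p.2)
          = (t.map (fval x)).foldl max (fval x p) := by
        rw [List.foldl_map]; rfl
      rw [this, List.map_cons, maximum_cons_foldl]

-- ---- A-side: the j-loop with its 'continue' is a plain foldl-max ----
lemma foldl_skip_eq (g : Int → Int) (i : Int) :
    ∀ (L : List Int) (res : Int), g i ≤ res →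
      L.foldl (fun r j => if i = j then r else max r (g j)) res = (L.map g).foldl max res := by
  intro L
  induction L with
  | nil => intro res _; rfl
  | cons j t ih =>
      intro res hres
      by_cases hij : i = j
      · subst hij
        simp only [List.foldl_cons, if_true, List.map_cons]
        rw [max_eq_left hres]
        exact ih res hres
      · simp only [List.foldl_cons, if_neg hij, List.map_cons]
        exact ih (max res (g j)) (le_trans hres (le_max_left _ _))

-- outer i-loop once each inner skip-loop is a plain foldl max
lemma outer_fold (base : Int) (g : Int → Int → Int) (hg : ∀ i, g i i = base) (J : List Int) :
    ∀ (L : List Int) (res : Int), base ≤ res →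
      L.foldl (fun r i => J.foldl (fun r' j => if i = j then r' else max r' (g i j)) r) res
        = L.foldl (fun r i => (J.map (g i)).foldl max r) res := by
  intro L
  induction L with
  | nil => intro res _; rfl
  | cons i t ih =>
      intro res hres
      rw [List.foldl_cons, List.foldl_cons, foldl_skip_eq (g i) i J res (by rw [hg i]; exact hres)]
      exact ih _ (le_trans hres (le_foldl_max_init _ _))

-- abbreviations for the pieces of both ports (proof-side only)
def psd (nums : List Int) (j : Int) : Int := PySem.List.pyGetD (List.scanl (· + ·) 0 nums) j 0
def xv (nums : List Int) (i : Int) : Int := PySem.List.pyGetD nums i 0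
def Dv (nums : List Int) (i j : Int) : Int := psd nums i - psd nums j - (i - j) * xv nums i
def ptv (nums : List Int) (j : Int) : Int × Int := (j, -(psd nums j))
def baseF (nums : List Int) : Int :=
  (PySem.List.pyRange 0 (nums.length : Int) 1).foldl
    (fun s i => s + (i + 1) * PySem.List.pyGetD nums i 0) 0
def Rmv (nums : List Int) (i : Int) : Int :=
  ((PySem.List.pyRange 1 ((nums.length : Int) + 1) 1).map (Dv nums i)).foldl max (Dv nums i 0)
def hullv (nums : List Int) : List (Int × Int) :=
  ((PySem.List.pyRange 0 ((nums.length : Int) + 1) 1).map (ptv nums)).foldl hstep []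
def Vv (nums : List Int) (i : Int) : Int :=
  hullQuery (xv nums i) (hullv nums) + psd nums i - i * xv nums i

lemma Dv_diag (nums : List Int) (i : Int) : Dv nums i i = 0 := by
  simp [Dv]

-- ---- A-side characterization ----
lemma solve_char (nums : List Int) (hne : nums ≠ []) :
    solve nums
      = baseF nums
        + ((PySem.List.pyRange 1 (nums.length : Int) 1).map (Rmv nums)).foldl max (Rmv nums 0) := by
  have hn : (0 : Int) < (nums.length : Int) := by
    have : nums.length ≠ 0 := fun h => hne (List.eq_nil_of_length_eq_zero h)
    omega
  have h0 : solve nums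
      = (PySem.List.pyRange 0 (nums.length : Int) 1).foldl (fun res i =>
          (PySem.List.pyRange 0 ((nums.length : Int) + 1) 1).foldl (fun res j =>
            if i = j then res
            else max res (baseF nums + PySem.List.pyGetD (List.scanl (· + ·) 0 nums) i 0
              - PySem.List.pyGetD (List.scanl (· + ·) 0 nums) j 0
              - (i - j) * PySem.List.pyGetD nums i 0)) res) (baseF nums) := rfl
  rw [h0]
  have hfn : (fun (res i : Int) =>
        (PySem.List.pyRange 0 ((nums.length : Int) + 1) 1).foldl (fun res j =>
          if i = j then res
          else max res (baseF nums + PySem.List.pyGetD (List.scanl (· + ·) 0 nums) i 0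
            - PySem.List.pyGetD (List.scanl (· + ·) 0 nums) j 0
            - (i - j) * PySem.List.pyGetD nums i 0)) res)
      = (fun (res i : Int) =>
        (PySem.List.pyRange 0 ((nums.length : Int) + 1) 1).foldl (fun res j =>
          if i = j then res else max res (baseF nums + Dv nums i j)) res) := by
    funext res i
    congr 1
    funext r j
    by_cases h : i = j
    · simp [h]
    · simp only [if_neg h, Dv, psd, xv]
      ring_nf
  rw [hfn]
  rw [outer_fold (baseF nums) (fun i j => baseF nums + Dv nums i j)
        (fun i => by simp [Dv_diag]) _ _ _ (le_refl _)]
  have hcons1 : PySem.List.pyRange 0 ((nums.length : Int) + 1) 1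
      = 0 :: PySem.List.pyRange 1 ((nums.length : Int) + 1) 1 :=
    PySem.List.pyRange_one_cons (by omega)
  have hrow : (fun (r i : Int) =>
        ((PySem.List.pyRange 0 ((nums.length : Int) + 1) 1).map
          (fun j => baseF nums + Dv nums i j)).foldl max r)
      = (fun (r i : Int) => max r (baseF nums + Rmv nums i)) := by
    funext r i
    rw [hcons1, List.map_cons, foldl_max_cons_split, foldl_max_map_add (Dv nums i) (baseF nums)]
    rfl
  rw [hrow]
  have hmap : (PySem.List.pyRange 0 (nums.length : Int) 1).foldl
        (fun (r i : Int) => max r (baseF nums + Rmv nums i)) (baseF nums)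
      = ((PySem.List.pyRange 0 (nums.length : Int) 1).map
          (fun i => baseF nums + Rmv nums i)).foldl max (baseF nums) := by
    rw [List.foldl_map]
  rw [hmap, PySem.List.pyRange_one_cons hn, List.map_cons, foldl_max_cons_split,
      foldl_max_map_add (Rmv nums) (baseF nums)]
  have hF : (0 : Int) ≤ ((PySem.List.pyRange 1 (nums.length : Int) 1).map (Rmv nums)).foldl max (Rmv nums 0) := by
    have h1 : (0 : Int) ≤ Rmv nums 0 := by
      rw [Rmv]
      exact le_of_eq_of_le (Dv_diag nums 0).symm (le_foldl_max_init _ _)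
    exact le_trans h1 (le_foldl_max_init _ _)
  simp only [zero_add] at *
  exact max_eq_right (by linarith)

-- ---- B-side characterization ----
lemma pts_pairwise (nums : List Int) :
    (((PySem.List.pyRange 0 ((nums.length : Int) + 1) 1).map (ptv nums)).Pairwise
      (fun a b => a.1 < b.1)) := by
  rw [List.pairwise_map]
  exact (PySem.List.pairwise_lt_pyRange_one 0 ((nums.length : Int) + 1)).imp (fun h => h)

lemma hull_maximum (nums : List Int) (x : Int) :
    ((hullv nums).map (fval x)).maximum
      = (((PySem.List.pyRange 0 ((nums.length : Int) + 1) 1).map (ptv nums)).map (fval x)).maximum := by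
  rw [hullv, hull_fold_max x _ [] (by simp) (pts_pairwise nums) (by simp)]
  simp only [List.map_nil, List.maximum_nil]
  exact max_eq_right bot_le

lemma hull_ne_nil (nums : List Int) : hullv nums ≠ [] := by
  rw [hullv, PySem.List.pyRange_one_cons (by omega : (0:Int) < (nums.length : Int) + 1),
      List.map_cons, List.foldl_cons]
  exact foldl_hstep_ne_nil _ _ (by simp [hstep])

lemma hullQuery_char (nums : List Int) (x : Int) :
    hullQuery x (hullv nums)
      = ((PySem.List.pyRange 1 ((nums.length : Int) + 1) 1).map (fun j => fval x (ptv nums j))).foldl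
          max (fval x (ptv nums 0)) := by
  have h1 := hullQuery_eq x (hullv nums) (hull_ne_nil nums)
  rw [hull_maximum nums x] at h1
  rw [PySem.List.pyRange_one_cons (by omega : (0:Int) < (nums.length : Int) + 1),
      List.map_cons, List.map_cons, maximum_cons_foldl, List.map_map] at h1
  exact WithBot.coe_inj.1 h1

lemma Vv_eq_Rmv (nums : List Int) (i : Int) : Vv nums i = Rmv nums i := by
  rw [Vv, hullQuery_char nums (xv nums i), Rmv]
  have hmapeq : (PySem.List.pyRange 1 ((nums.length : Int) + 1) 1).map (Dv nums i)
      = (PySem.List.pyRange 1 ((nums.length : Int) + 1) 1).map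
          (fun j => (psd nums i - i * xv nums i) + fval (xv nums i) (ptv nums j)) := by
    apply List.map_congr_left
    intro j _
    simp only [Dv, fval, ptv]
    ring
  have hinit : Dv nums i 0 = (psd nums i - i * xv nums i) + fval (xv nums i) (ptv nums 0) := by
    simp only [Dv, fval, ptv]
    ring
  rw [hmapeq, hinit, foldl_max_map_add (fun j => fval (xv nums i) (ptv nums j))]
  ring

lemma solve_alt_char (nums : List Int) (hne : nums ≠ []) :
    solve_alt nums
      = ((PySem.List.enumerate nums 0).map (fun iv => (iv.1 + 1) * iv.2)).sum
        + ((PySem.List.pyRange 1 (nums.length : Int) 1).map (Vv nums)).foldl max (Vv nums 0) := by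
  have hn : (0 : Int) < (nums.length : Int) := by
    have : nums.length ≠ 0 := fun h => hne (List.eq_nil_of_length_eq_zero h)
    omega
  have henum : PySem.List.enumerate nums 0
      = (PySem.List.pyRange 0 (nums.length : Int) 1).map
          (fun j => (j, PySem.List.pyGetD nums j 0)) := by
    have := PySem.List.enumerate_eq_map_pyRange nums 0
    simpa [PySem.List.len_eq] using this
  have hhull : ((PySem.List.pyRange 0 ((nums.length : Int) + 1) 1).foldl
        (fun h j => (j, -(PySem.List.pyGetD (List.scanl (· + ·) 0 nums) j 0)) ::
          popHull (j, -(PySem.List.pyGetD (List.scanl (· + ·) 0 nums) j 0)) h) [])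
      = hullv nums := by
    rw [hullv, List.foldl_map]
    rfl
  have h0 : solve_alt nums
      = match (PySem.List.enumerate nums 0).map (fun iv =>
            hullQuery iv.2 (hullv nums) + PySem.List.pyGetD (List.scanl (· + ·) 0 nums) iv.1 0
              - iv.1 * iv.2) with
        | [] => ((PySem.List.enumerate nums 0).map (fun iv => (iv.1 + 1) * iv.2)).sum
        | v :: t => ((PySem.List.enumerate nums 0).map (fun iv => (iv.1 + 1) * iv.2)).sum
            + t.foldl max v := by
    rw [← hhull]
    simp only [solve_alt, if_neg hne]
  rw [h0, henum, List.map_map]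
  have hvals : ((PySem.List.pyRange 0 (nums.length : Int) 1).map
        ((fun iv => hullQuery iv.2 (hullv nums)
            + PySem.List.pyGetD (List.scanl (· + ·) 0 nums) iv.1 0 - iv.1 * iv.2)
          ∘ (fun j => (j, PySem.List.pyGetD nums j 0))))
      = (PySem.List.pyRange 0 (nums.length : Int) 1).map (Vv nums) := by
    apply List.map_congr_left
    intro j _
    simp [Vv, xv, psd]
  rw [hvals, PySem.List.pyRange_one_cons hn, List.map_cons]
  simp only [zero_add]

-- ===== VERDICT (by name: the statement is the Claim_ definition above) =====
theorem solve_spec : Claim_equal_solve := by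
  intro nums _
  unfold Spec_solve
  by_cases hne : nums = []
  · subst hne
    rfl
  · rw [solve_char nums hne, solve_alt_char nums hne]
    have hbase : baseF nums
        = ((PySem.List.enumerate nums 0).map (fun iv => (iv.1 + 1) * iv.2)).sum := by
      have he := PySem.List.enumerate_eq_map_pyRange nums 0
      rw [baseF, PySem.List.foldl_add, zero_add, he, List.map_map]
      simp [PySem.List.len_eq]
      rfl
    have hmap : (PySem.List.pyRange 1 (nums.length : Int) 1).map (Vv nums)
        = (PySem.List.pyRange 1 (nums.length : Int) 1).map (Rmv nums) :=
      List.map_congr_left (fun i _ => Vv_eq_Rmv nums i)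
    rw [hbase, hmap, Vv_eq_Rmv nums 0]
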